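-- pv_equiv track=rewrite | github.com/BlueBlazin/pyrs | scripts/probe_stdlib_full.py | module_candidate_keys
-- ===== SOURCE A (Python) =====
-- def module_candidate_keys(module: str) -> set[str]:
--     keys = {module.replace(".", "_")}
--     top = module.split(".")[0]
--     keys.add(top.replace(".", "_"))
--     if module.startswith("_"):
--         keys.add(module.lstrip("_").replace(".", "_"))
--     if top.startswith("_"):
--         keys.add(top.lstrip("_").replace(".", "_"))
--     if "." in module:
--         tail = module.split(".")[-1]
--         keys.add(tail.replace(".", "_"))
--         if tail.startswith("_"):
--             keys.add(tail.lstrip("_").replace(".", "_"))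
--     return {key for key in keys if key}
-- ===== SOURCE B (Python) =====
-- def _strip_us(raw, mapped):
--     # drop from `mapped` the leading-underscore run of `raw`
--     i = 0
--     while i < len(raw) and raw[i] == "_":
--         i += 1
--     return mapped[i:]
--
--
-- def module_candidate_keys(module: str) -> set[str]:
--     # One character-level pass computes everything at once (no split/replace/lstrip):
--     # the dot->underscore mapped form, the segment before the first dot, and the
--     # segment after the last dot; candidates are then collected uniformly.
--     top = None   # segment before the first dot (None while no dot seen)
--     buf = []     # chars since the most recent dot
--     full = []    # module with '.' mapped to '_'
--     for ch in module:
--         if ch == ".":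
--             if top is None:
--                 top = "".join(buf)
--             buf = []
--             full.append("_")
--         else:
--             buf.append(ch)
--             full.append(ch)
--     last = "".join(buf)
--     full = "".join(full)
--     if top is None:
--         groups = [[(module, full), (last, last)]]
--     else:
--         groups = [[(module, full), (top, top)], [(last, last)]]
--     keys = set()
--     for group in groups:
--         for raw, mapped in group:
--             if mapped:
--                 keys.add(mapped)
--         for raw, mapped in group:
--             if raw.startswith("_"):
--                 v = _strip_us(raw, mapped)
--                 if v:
--                     keys.add(v)
--     return keys
-- ===== Notes on version B (the rewrite author's own statement) =====
-- stated objective: alternative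
-- what changed: A derives each candidate with staged whole-string library calls (replace, split indexing, lstrip, three times over); B makes one character-level pass that simultaneously builds the dot-to-underscore mapped string, the segment before the first dot and the segment after the last dot, then collects the candidates and their underscore-stripped variants uniformly from these (raw, mapped) sources.
import Mathlib
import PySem

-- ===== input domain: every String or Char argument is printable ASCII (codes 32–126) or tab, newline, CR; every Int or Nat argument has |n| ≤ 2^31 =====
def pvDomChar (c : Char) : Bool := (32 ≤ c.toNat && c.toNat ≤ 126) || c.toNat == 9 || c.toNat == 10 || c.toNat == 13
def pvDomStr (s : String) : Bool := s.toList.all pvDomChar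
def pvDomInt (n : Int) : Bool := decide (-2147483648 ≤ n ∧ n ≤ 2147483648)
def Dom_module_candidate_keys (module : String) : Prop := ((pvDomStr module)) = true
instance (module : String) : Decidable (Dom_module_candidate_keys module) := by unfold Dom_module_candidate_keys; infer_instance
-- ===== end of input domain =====

-- B replaces A's staged library calls (replace / split / lstrip on the whole string,
-- three times over) by ONE character-level pass that computes the dot-mapped form,
-- the segment before the first dot and the segment after the last dot simultaneously,
-- then collects the candidates uniformly (objective: alternative — single scan
-- instead of staged string-library passes).

-- ===== PORT A =====
-- exact port of s.lstrip("_"): drop leading '_' characters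
def pvLstripUS (s : String) : String := String.ofList (s.toList.dropWhile (fun c => c == '_'))

def module_candidate_keys (module : String) : List String :=
  let keys := PySem.Set.ofList [PySem.Str.replace module "." "_"]
  -- module.split(".")[0]: the split list is never empty, so [0] never raises
  let top := ((PySem.Str.split? module ".").getD []).headD ""
  let keys := PySem.Set.add keys (PySem.Str.replace top "." "_")
  let keys := if PySem.Str.startswith module "_" then PySem.Set.add keys (PySem.Str.replace (pvLstripUS module) "." "_") else keys
  let keys := if PySem.Str.startswith top "_" then PySem.Set.add keys (PySem.Str.replace (pvLstripUS top) "." "_") else keys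
  let keys :=
    if PySem.Str.isIn "." module then
      -- module.split(".")[-1]: the split list is never empty, so [-1] never raises
      let tail := ((PySem.Str.split? module ".").getD []).getLastD ""
      let keys := PySem.Set.add keys (PySem.Str.replace tail "." "_")
      if PySem.Str.startswith tail "_" then PySem.Set.add keys (PySem.Str.replace (pvLstripUS tail) "." "_") else keys
    else keys
  -- {key for key in keys if key}
  PySem.Set.ofList (keys.filter (fun k => !(k == "")))

-- ===== PORT B =====
-- the body of Source B's character loop (top, buf, full), one step per character
def pvStep (st : Option (List Char) × List Char × List Char) (c : Char) :
    Option (List Char) × List Char × List Char :=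
  if c = '.' then ((if st.1.isNone then some st.2.1 else st.1), [], st.2.2 ++ ['_'])
  else (st.1, st.2.1 ++ [c], st.2.2 ++ [c])

-- exact port of Source B's _strip_us(raw, mapped): drop from `mapped` the
-- leading-underscore run of `raw` (the strings are kept as char lists; the
-- "".join moments of Source B are the String.ofList at each set insertion)
def pvStripUS : List Char → List Char → List Char
  | r :: rs, m :: ms => if r = '_' then pvStripUS rs ms else m :: ms
  | _, mapped => mapped

def module_candidate_keys_alt (module : String) : List String :=
  let cs := module.toList
  let st := cs.foldl pvStep (none, [], [])
  let last := st.2.1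
  let full := st.2.2
  let groups : List (List (List Char × List Char)) :=
    match st.1 with
    | none => [[(cs, full), (last, last)]]
    | some t => [[(cs, full), (t, t)], [(last, last)]]
  groups.foldl (fun keys group =>
    let keys := group.foldl (fun keys p =>
      if !p.2.isEmpty then PySem.Set.add keys (String.ofList p.2) else keys) keys
    group.foldl (fun keys p =>
      if PySem.Chars.startswith p.1 ['_'] then
        let v := pvStripUS p.1 p.2
        if !v.isEmpty then PySem.Set.add keys (String.ofList v) else keys
      else keys) keys) PySem.Set.empty

-- ===== PRECONDITION & SPEC =====
def Spec_module_candidate_keys (module : String) (out : List String) : Prop := out = module_candidate_keys_alt module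
instance (module : String) (out : List String) : Decidable (Spec_module_candidate_keys module out) := by unfold Spec_module_candidate_keys; infer_instance

-- ===== CLAIM (what is proved, stated in full; the proofs are below) =====
def Claim_equal_module_candidate_keys : Prop := ∀ (module : String), Dom_module_candidate_keys module → Spec_module_candidate_keys module (module_candidate_keys module)

-- ===== LEMMAS AND PROOFS =====

-- the list of dot-separated segments of cs, A's module.split(".") in recursive form
def pvSplitDots : List Char → List (List Char)
  | [] => [[]]
  | c :: t => if c = '.' then [] :: pvSplitDots t
              else (c :: (pvSplitDots t).headD []) :: (pvSplitDots t).tail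

-- the segment after the last dot (the whole list when there is no dot)
def pvTail : List Char → List Char
  | [] => []
  | c :: t => if '.' ∈ t then pvTail t else if c = '.' then t else c :: t

def pvMapDot (c : Char) : Char := if c = '.' then '_' else c

lemma pv_splitDots_ne_nil (cs : List Char) : pvSplitDots cs ≠ [] := by
  cases cs with
  | nil => simp [pvSplitDots]
  | cons c t => simp only [pvSplitDots]; split <;> simp

lemma pv_cons_headD_tail {α : Type} (xs : List (List α)) (h : xs ≠ []) :
    xs.head?.getD [] :: xs.tail = xs := by
  cases xs with
  | nil => exact absurd rfl h
  | cons a l => rfl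

lemma pv_split_go (l : List Char) : ∀ (cur : List Char) (acc : List (List Char)) (fuel : Nat), l.length ≤ fuel →
    PySem.Chars.splitOn.go ['.'] fuel l cur acc =
      acc.reverse ++ (cur.reverse ++ (pvSplitDots l).head?.getD []) :: (pvSplitDots l).tail := by
  induction l with
  | nil =>
    intro cur acc fuel _
    cases fuel <;> simp [PySem.Chars.splitOn.go, pvSplitDots]
  | cons c t ih =>
    intro cur acc fuel h
    cases fuel with
    | zero => simp at h
    | succ f =>
      rw [PySem.Chars.splitOn.go]
      have ht : t.length ≤ f := by simp at h; omega
      by_cases hc : c = '.'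
      · subst hc
        simp only [pvSplitDots, if_true]
        rw [if_pos (by simp), show List.drop ['.'].length ('.' :: t) = t from rfl,
          ih [] (cur.reverse :: acc) f ht]
        simp [pv_cons_headD_tail _ (pv_splitDots_ne_nil t)]
      · simp only [pvSplitDots, hc, if_false]
        rw [if_neg (by simp [Ne.symm hc]), ih (c :: cur) acc f ht]
        simp

lemma pv_splitOn (cs : List Char) : PySem.Chars.splitOn cs ['.'] = pvSplitDots cs := by
  rw [PySem.Chars.splitOn, pv_split_go cs [] [] (cs.length + 1) (by omega)]
  simp [pv_cons_headD_tail _ (pv_splitDots_ne_nil cs)]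

lemma pv_head (cs : List Char) : (pvSplitDots cs).head?.getD [] = cs.takeWhile (fun c => c != '.') := by
  induction cs with
  | nil => simp [pvSplitDots]
  | cons c t ih =>
    by_cases hc : c = '.'
    · subst hc; simp [pvSplitDots]
    · have hb : (c != '.') = true := by simp [hc]
      simp [pvSplitDots, hc, hb, ih]

lemma pv_nodot_splitDots (cs : List Char) (h : '.' ∉ cs) : pvSplitDots cs = [cs] := by
  induction cs with
  | nil => simp [pvSplitDots]
  | cons c t ih =>
    have hc : c ≠ '.' := fun h' => h (by simp [h'])
    have ht : '.' ∉ t := fun h' => h (by simp [h'])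
    simp [pvSplitDots, hc, ih ht]

lemma pv_splitDots_tail_ne_nil (cs : List Char) (h : '.' ∈ cs) : (pvSplitDots cs).tail ≠ [] := by
  induction cs with
  | nil => simp at h
  | cons c t ih =>
    by_cases hc : c = '.'
    · subst hc; simp [pvSplitDots, pv_splitDots_ne_nil t]
    · have ht : '.' ∈ t := by rcases List.mem_cons.mp h with h' | h'; exact absurd h'.symm hc; exact h'
      simpa [pvSplitDots, hc] using ih ht

lemma pv_getLast?_cons_ne_nil {α : Type} (a : α) (l : List α) (h : l ≠ []) :
    (a :: l).getLast? = l.getLast? := by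
  cases l with
  | nil => exact absurd rfl h
  | cons b m => simp [List.getLast?_cons_cons]

lemma pv_getLast (cs : List Char) (h : '.' ∈ cs) :
    (pvSplitDots cs).getLast? = some (pvTail cs) := by
  induction cs with
  | nil => simp at h
  | cons c t ih =>
    by_cases hc : c = '.'
    · subst hc
      by_cases ht : '.' ∈ t
      · rw [show pvSplitDots ('.' :: t) = [] :: pvSplitDots t by simp [pvSplitDots],
          pv_getLast?_cons_ne_nil _ _ (pv_splitDots_ne_nil t), ih ht]
        simp [pvTail, ht]
      · rw [show pvSplitDots ('.' :: t) = [] :: pvSplitDots t by simp [pvSplitDots],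
          pv_nodot_splitDots t ht]
        simp [pvTail, ht]
    · have ht : '.' ∈ t := by rcases List.mem_cons.mp h with h' | h'; exact absurd h'.symm hc; exact h'
      have h2 := pv_splitDots_tail_ne_nil t ht
      rw [show pvSplitDots (c :: t) = (c :: (pvSplitDots t).head?.getD []) :: (pvSplitDots t).tail by
            simp [pvSplitDots, hc],
        pv_getLast?_cons_ne_nil _ _ h2,
        show (pvSplitDots t).tail.getLast? = ((pvSplitDots t).head?.getD [] :: (pvSplitDots t).tail).getLast? from
          (pv_getLast?_cons_ne_nil _ _ h2).symm,
        pv_cons_headD_tail _ (pv_splitDots_ne_nil t), ih ht]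
      simp [pvTail, ht]

lemma pv_rep_go (l : List Char) : ∀ (acc : List Char) (fuel : Nat), l.length ≤ fuel →
    PySem.Chars.replace.go ['.'] ['_'] fuel l acc = acc.reverse ++ l.map pvMapDot := by
  induction l with
  | nil =>
    intro acc fuel _
    cases fuel <;> simp [PySem.Chars.replace.go]
  | cons c t ih =>
    intro acc fuel h
    cases fuel with
    | zero => simp at h
    | succ f =>
      rw [PySem.Chars.replace.go]
      have ht : t.length ≤ f := by simp at h; omega
      by_cases hc : c = '.'
      · subst hc
        simp [List.isPrefixOf, ih _ f ht, pvMapDot]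
      · simp [List.isPrefixOf, hc, ih _ f ht, pvMapDot]
        exact fun h' => absurd h'.symm hc

lemma pv_replace (cs : List Char) : PySem.Chars.replace cs ['.'] ['_'] = cs.map pvMapDot := by
  simpa [PySem.Chars.replace] using pv_rep_go cs [] cs.length le_rfl

lemma pv_map_nodot (l : List Char) (h : '.' ∉ l) : l.map pvMapDot = l := by
  rw [List.map_congr_left (fun x hx => ?_), List.map_id]
  simp only [pvMapDot, id_eq, ite_eq_right_iff]
  exact fun h' => absurd (h' ▸ hx) h

lemma pv_tail_nodot (cs : List Char) : '.' ∉ pvTail cs := by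
  induction cs with
  | nil => simp [pvTail]
  | cons c t ih =>
    by_cases ht : '.' ∈ t
    · simpa [pvTail, ht] using ih
    · by_cases hc : c = '.'
      · simp [pvTail, ht, hc]
      · simp only [pvTail, ht, hc, if_false, List.mem_cons]
        intro h
        rcases h with h | h
        · exact hc h.symm
        · exact h.elim

lemma pv_takeWhile_nodot (cs : List Char) : '.' ∉ cs.takeWhile (fun c => c != '.') := by
  intro h
  have := List.mem_takeWhile_imp h
  simp at this

lemma pv_dropWhile_nodot (l : List Char) (h : '.' ∉ l) :
    '.' ∉ l.dropWhile (fun c => c == '_') := by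
  exact fun h' => h ((List.dropWhile_sublist _).subset h')

lemma pv_scan (cs : List Char) : ∀ (top0 : Option (List Char)) (buf0 full0 : List Char),
    cs.foldl pvStep (top0, buf0, full0) =
      ((if '.' ∈ cs then (if top0.isNone then some (buf0 ++ cs.takeWhile (fun c => c != '.')) else top0) else top0),
       (if '.' ∈ cs then pvTail cs else buf0 ++ cs),
       full0 ++ cs.map pvMapDot) := by
  induction cs with
  | nil => intro top0 buf0 full0; simp
  | cons c t ih =>
    intro top0 buf0 full0
    rw [List.foldl_cons]
    by_cases hc : c = '.'
    · subst hc
      rw [show pvStep (top0, buf0, full0) '.' =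
            ((if top0.isNone then some buf0 else top0), [], full0 ++ ['_']) from by simp [pvStep]]
      rw [ih]
      by_cases ht : '.' ∈ t <;> by_cases htop : top0.isNone <;>
        cases top0 <;> simp_all [pvTail, pvMapDot]
    · rw [show pvStep (top0, buf0, full0) c = (top0, buf0 ++ [c], full0 ++ [c]) from by simp [pvStep, hc]]
      rw [ih]
      have hb : (c != '.') = true := by simp [hc]
      have hm : ('.' ∈ c :: t) = ('.' ∈ t) := by
        simp only [List.mem_cons, eq_iff_iff, or_iff_right_iff_imp]
        exact fun h => absurd h.symm hc
      by_cases ht : '.' ∈ t <;>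
        simp [ht, hm, pvTail, hc, hb, pvMapDot]

lemma pv_stripUS_self (l : List Char) : pvStripUS l l = l.dropWhile (fun c => c == '_') := by
  induction l with
  | nil => simp [pvStripUS]
  | cons c t ih =>
    by_cases hc : c = '_' <;> simp [pvStripUS, hc, ih]

lemma pv_stripUS_map (l : List Char) :
    pvStripUS l (l.map pvMapDot) = (l.dropWhile (fun c => c == '_')).map pvMapDot := by
  induction l with
  | nil => simp [pvStripUS]
  | cons c t ih =>
    by_cases hc : c = '_' <;> simp [pvStripUS, hc, ih, pvMapDot]

lemma pv_filter_add (s : PySem.Set String) (v : String) :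
    (PySem.Set.add s v).filter (fun k => !(k == "")) =
      if v = "" then s.filter (fun k => !(k == ""))
      else PySem.Set.add (s.filter (fun k => !(k == ""))) v := by
  unfold PySem.Set.add
  by_cases hv : v = ""
  · subst hv; simp
    split <;> simp [List.filter_append]
  · by_cases h : v ∈ s
    · simp [h, hv, PySem.Set.contains_eq_listContains, List.mem_filter]
  
    · simp [h, hv, PySem.Set.contains_eq_listContains, List.filter_append, List.mem_filter]

lemma pv_guard (s : PySem.Set String) (v : List Char) :
    (if !v.isEmpty then PySem.Set.add s (String.ofList v) else s) =
      if String.ofList v = "" then s else PySem.Set.add s (String.ofList v) := by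
  by_cases h : v = [] <;> simp [h, String.ofList_eq_empty_iff]

lemma pv_headD_map (xs : List (List Char)) (h : xs ≠ []) :
    (xs.map String.ofList).headD "" = String.ofList (xs.head?.getD []) := by
  cases xs with
  | nil => exact absurd rfl h
  | cons a l => rfl

lemma pv_getLastD_map (xs : List (List Char)) (a : List Char) (h : xs.getLast? = some a) :
    (xs.map String.ofList).getLastD "" = String.ofList a := by
  rw [List.getLastD_eq_getLast?, List.getLast?_map, h]
  rfl

lemma pv_takeWhile_nodot_self (cs : List Char) (h : '.' ∉ cs) :
    cs.takeWhile (fun c => c != '.') = cs := by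
  induction cs with
  | nil => simp
  | cons c t ih =>
    have hc : (c != '.') = true := by simp; exact fun h' => h (by simp [h'])
    have ht : '.' ∉ t := fun h' => h (by simp [h'])
    simp [hc, ih ht]

lemma pv_toList_dot : ".".toList = ['.'] := rfl
lemma pv_toList_us : "_".toList = ['_'] := rfl

lemma pvA_replace (s : String) :
    PySem.Str.replace s "." "_" = String.ofList (s.toList.map pvMapDot) := by
  rw [PySem.Str.replace, pv_toList_dot, pv_toList_us, pv_replace]

lemma pvA_split (s : String) :
    (PySem.Str.split? s ".").getD [] = (pvSplitDots s.toList).map String.ofList := by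
  rw [PySem.Str.split?, pv_toList_dot, PySem.Chars.split?]
  simp [pv_splitOn]

lemma pvA_top (s : String) :
    ((PySem.Str.split? s ".").getD []).headD "" =
      String.ofList (s.toList.takeWhile (fun c => c != '.')) := by
  rw [pvA_split, pv_headD_map _ (pv_splitDots_ne_nil _), pv_head]

lemma pvA_tail (s : String) (h : '.' ∈ s.toList) :
    ((PySem.Str.split? s ".").getD []).getLastD "" = String.ofList (pvTail s.toList) := by
  rw [pvA_split, pv_getLastD_map _ _ (pv_getLast _ h)]

lemma pvA_startswith (s : String) :
    PySem.Str.startswith s "_" = PySem.Chars.startswith s.toList ['_'] := by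
  rw [PySem.Str.startswith_eq, pv_toList_us]

lemma pvA_isIn_pos (s : String) (h : '.' ∈ s.toList) : PySem.Str.isIn "." s = true := by
  rw [PySem.Str.isIn_eq, pv_toList_dot]
  exact (PySem.Chars.isIn_iff_infix _ _).mpr ((List.singleton_infix_iff _ _).mpr h)

lemma pvA_isIn_neg (s : String) (h : '.' ∉ s.toList) : PySem.Str.isIn "." s = false := by
  rw [PySem.Str.isIn_eq, pv_toList_dot]
  exact (PySem.Chars.isIn_eq_false_iff _ _).mpr (fun hin => h ((List.singleton_infix_iff _ _).mp hin))

lemma pv_ofList_singleton (v : String) : PySem.Set.ofList [v] = PySem.Set.add PySem.Set.empty v := rfl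

-- ===== VERDICT (by name: the statement is the Claim_ definition above) =====
set_option maxHeartbeats 2000000 in
theorem module_candidate_keys_spec : Claim_equal_module_candidate_keys := by
  intro module _
  unfold Spec_module_candidate_keys module_candidate_keys module_candidate_keys_alt
  simp only [pv_scan]
  by_cases hdot : '.' ∈ module.toList
  · have hin := pvA_isIn_pos module hdot
    have htw := pv_takeWhile_nodot module.toList
    have htl := pv_tail_nodot module.toList
    simp only [hdot, if_true, Option.isNone_none, List.nil_append, hin, pvA_top,
      pvA_tail module hdot, pvA_replace, pvA_startswith, pvLstripUS, String.toList_ofList,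
      pv_map_nodot _ htw, pv_map_nodot _ htl,
      pv_map_nodot _ (pv_dropWhile_nodot _ htw), pv_map_nodot _ (pv_dropWhile_nodot _ htl),
      List.foldl_cons, List.foldl_nil, pv_stripUS_self, pv_stripUS_map]
    by_cases h1 : PySem.Chars.startswith module.toList ['_'] <;>
    by_cases h2 : PySem.Chars.startswith (module.toList.takeWhile (fun c => c != '.')) ['_'] <;>
    by_cases h3 : PySem.Chars.startswith (pvTail module.toList) ['_'] <;>
      simp only [h1, h2, h3, if_true, if_false, Bool.false_eq_true, ] <;>
      rw [PySem.Set.ofList_eq_self_of_nodup _ (List.Nodup.filter _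
        (by (repeat' apply PySem.Set.nodup_add); exact PySem.Set.nodup_ofList _))] <;>
      simp only [pv_ofList_singleton, pv_filter_add, pv_guard, PySem.Set.empty, List.filter_nil]
  · have hin := pvA_isIn_neg module hdot
    have hself := pv_takeWhile_nodot_self module.toList hdot
    simp only [hdot, if_false, hin, Bool.false_eq_true, Option.isNone_none, List.nil_append,
      pvA_top, pvA_replace, pvA_startswith, pvLstripUS, String.toList_ofList, hself,
      pv_map_nodot _ hdot, pv_map_nodot _ (pv_dropWhile_nodot _ hdot),
      List.foldl_cons, List.foldl_nil, pv_stripUS_self]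
    by_cases h1 : PySem.Chars.startswith module.toList ['_'] <;>
      simp only [h1, if_true, if_false, Bool.false_eq_true, ] <;>
      rw [PySem.Set.ofList_eq_self_of_nodup _ (List.Nodup.filter _
        (by (repeat' apply PySem.Set.nodup_add); exact PySem.Set.nodup_ofList _))] <;>
      simp only [pv_ofList_singleton, pv_filter_add, pv_guard, PySem.Set.empty, List.filter_nil]
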